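-- pv_equiv track=rewrite | github.com/awolcat/alx-higher_level_programming | 0x03-python-data_structures/4-new_in_list.py | new_in_list
-- ===== SOURCE A (Python) =====
-- def new_in_list(my_list, idx, element):
--     new_list = []
--     if idx < 0:
--         return my_list
--     elif idx >= len(my_list):
--         return my_list
--     else:
--         for index in range(len(my_list)):
--             if idx != index:
--                 new_list.append(my_list[index])
--             else:
--                 new_list.append(element)
--         return new_list
-- ===== SOURCE B (Python) =====
-- def new_in_list(my_list, idx, element):
--     if idx < 0:
--         return my_list
--     elif idx >= len(my_list):
--         return my_list
--     else:
--         return my_list[:idx] + [element] + my_list[idx + 1:]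
-- ===== Notes on version B (the rewrite author's own statement) =====
-- stated objective: simpler
-- what changed: Replaces the per-index loop with a per-element equality test by a single slice-and-concatenate expression my_list[:idx] + [element] + my_list[idx+1:], keeping the two out-of-range guards.
import Mathlib
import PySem

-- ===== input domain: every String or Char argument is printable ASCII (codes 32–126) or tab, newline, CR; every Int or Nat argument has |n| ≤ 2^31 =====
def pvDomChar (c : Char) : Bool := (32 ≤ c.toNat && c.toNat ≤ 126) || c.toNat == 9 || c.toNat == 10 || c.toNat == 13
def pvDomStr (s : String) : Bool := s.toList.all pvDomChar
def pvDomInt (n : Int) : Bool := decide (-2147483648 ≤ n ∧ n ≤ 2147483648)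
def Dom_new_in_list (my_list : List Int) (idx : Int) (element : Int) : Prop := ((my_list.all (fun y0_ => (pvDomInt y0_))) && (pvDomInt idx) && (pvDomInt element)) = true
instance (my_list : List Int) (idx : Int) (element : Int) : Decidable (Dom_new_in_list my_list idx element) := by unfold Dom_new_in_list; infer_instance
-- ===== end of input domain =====

-- B replaces A's per-index loop with slice-and-concatenate (my_list[:idx] + [element] + my_list[idx+1:]), keeping A's out-of-range guards; objective: simpler.


-- ===== PORT A =====
-- Port of A: guards, then a loop over range(len) appending element-or-copy per index.
def new_in_list (my_list : List Int) (idx : Int) (element : Int) : List Int :=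
  if idx < 0 then my_list
  else if idx ≥ (my_list.length : Int) then my_list
  else
    (PySem.List.pyRange 0 my_list.length 1).foldl
      (fun new_list index =>
        if idx ≠ index then new_list ++ [PySem.List.pyGetD my_list index 0]
        else new_list ++ [element]) []

-- ===== PORT B =====
-- B: same guards, result built as my_list[:idx] + [element] + my_list[idx+1:].
def new_in_list_alt (my_list : List Int) (idx : Int) (element : Int) : List Int :=
  if idx < 0 then my_list
  else if idx ≥ (my_list.length : Int) then my_list
  else
    PySem.List.slice my_list none (some idx) ++ [element] ++
      PySem.List.slice my_list (some (idx + 1)) none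

-- ===== PRECONDITION & SPEC =====
def Spec_new_in_list (my_list : List Int) (idx : Int) (element : Int) (out : List Int) : Prop := out = new_in_list_alt my_list idx element
instance (my_list : List Int) (idx : Int) (element : Int) (out : List Int) : Decidable (Spec_new_in_list my_list idx element out) := by unfold Spec_new_in_list; infer_instance

-- ===== CLAIM =====
def Claim_equal_new_in_list : Prop := ∀ (my_list : List Int) (idx : Int) (element : Int), Dom_new_in_list my_list idx element → Spec_new_in_list my_list idx element (new_in_list my_list idx element)

-- ===== LEMMAS AND PROOFS =====

lemma map_range_ite (xs : List Int) (j : Nat) (e : Int) (hj : j < xs.length) :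
    (List.range xs.length).map (fun k => if j ≠ k then xs.getD k 0 else e)
      = xs.take j ++ e :: xs.drop (j + 1) := by
  apply List.ext_getElem
  · simp; omega
  · intro i h1 h2
    have hi : i < xs.length := by simpa using h1
    rcases lt_trichotomy i j with h | h | h
    · rw [List.getElem_append_left (by simp; omega)]
      simp [hi, Nat.ne_of_gt h, List.getElem_take]
    · subst h
      rw [List.getElem_append_right (by simp only [List.length_take]; omega)]
      simp [Nat.min_eq_left hi.le]
    · rw [List.getElem_append_right (by simp only [List.length_take]; omega)]
      have hmin : (List.take j xs).length = j := by simp; omega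
      simp only [hmin, List.getElem_cons]
      have h0 : ¬ (i - j = 0) := by omega
      simp [h0, Nat.ne_of_lt h, hi]
      congr 1
      omega

lemma inner_eq (xs : List Int) (idx e : Int) (h0 : 0 ≤ idx) (hlen : idx < (xs.length : Int)) :
    (PySem.List.pyRange 0 xs.length 1).foldl
        (fun acc index =>
          if idx ≠ index then acc ++ [PySem.List.pyGetD xs index 0]
          else acc ++ [e]) []
      = xs.take idx.toNat ++ e :: xs.drop (idx.toNat + 1) := by
  have hfun : (fun (acc : List Int) index =>
        if idx ≠ index then acc ++ [PySem.List.pyGetD xs index 0] else acc ++ [e])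
      = fun acc index => acc ++ [if idx ≠ index then PySem.List.pyGetD xs index 0 else e] := by
    funext acc index; split_ifs <;> rfl
  rw [hfun]
  rw [PySem.List.foldl_append_singleton_eq_map
    (fun index => if idx ≠ index then PySem.List.pyGetD xs index 0 else e)
    (PySem.List.pyRange 0 xs.length 1) []]
  rw [List.nil_append, PySem.List.pyRange_zero_natCast, List.map_map]
  have hj : idx.toNat < xs.length := by omega
  have hf : ((fun index => if idx ≠ index then PySem.List.pyGetD xs index 0 else e) ∘
        (fun k : Nat => (k : Int)))
      = fun k : Nat => if idx.toNat ≠ k then xs.getD k 0 else e := by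
    funext k
    have hiff : (idx ≠ (k : Int)) = (idx.toNat ≠ k) := by
      simp only [eq_iff_iff]; omega
    simp only [Function.comp, hiff, PySem.List.pyGetD_natCast]
  rw [hf]
  exact map_range_ite xs idx.toNat e hj

-- ===== VERDICT =====
theorem new_in_list_spec : Claim_equal_new_in_list := by
  intro my_list idx element _
  unfold Spec_new_in_list new_in_list new_in_list_alt
  split_ifs with h1 h2
  · rfl
  · rfl
  · replace h1 : 0 ≤ idx := by omega
    replace h2 : idx < (my_list.length : Int) := by omega
    rw [inner_eq my_list idx element h1 h2,
      PySem.List.slice_to my_list h1, PySem.List.slice_from my_list (by omega)]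
    have : (idx + 1).toNat = idx.toNat + 1 := by omega
    simp [this]
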